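-- pv_equiv track=rewrite | github.com/whglamrock/leetcode_series | leetcode2565 Subsequence With the Minimum Score.py | minimumScore
-- ===== SOURCE A (Python) =====
-- def minimumScore(s: str, t: str) -> int:
--     n = len(s)
--     m = len(t)
--     suffix = [-1] * n
--     j = 0
--     for i in range(n - 1, -1, -1):
--         if j < m and s[i] == t[m - 1 - j]:
--             j += 1
--         suffix[i] = j
--
--     j = 0
--     prefix = [-1] * n
--     for i in range(n):
--         if j < m and s[i] == t[j]:
--             j += 1
--         prefix[i] = j
--
--     ans = len(t)
--     for i in range(1, n):
--         # if ans becomes < 0 it means t is a already subsequence of s and we don't need to remove any index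
--         ans = min(ans, m - prefix[i - 1] - suffix[i])
--     # first part of s to match t's prefix is empty
--     ans = min(ans, m - suffix[0])
--     # second part of s to match t's suffix is empty
--     ans = min(ans, m - prefix[n - 1])
--
--     return max(ans, 0)
-- ===== SOURCE B (Python) =====
-- def minimumScore(s: str, t: str) -> int:
--     # Different algorithm: binary search on the score k, with a direct
--     # feasibility check "can some length-k block of t be removed so that the
--     # rest is a subsequence of s" done by plain greedy subsequence tests.
--     m = len(t)
--
--     def can(k):
--         for l in range(m - k + 1):
--             rest = t[:l] + t[l + k:]
--             it = iter(s)
--             if all(c in it for c in rest):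
--                 return True
--         return False
--
--     lo, hi = 0, m
--     while lo < hi:
--         mid = (lo + hi) // 2
--         if can(mid):
--             hi = mid
--         else:
--             lo = mid + 1
--     return lo
-- ===== Notes on version B (the rewrite author's own statement) =====
-- stated objective: alternative
-- what changed: B abandons A's prefix/suffix DP arrays entirely: it binary-searches the smallest removable-window length k, deciding each candidate k by directly testing, for every cut position l, whether t with t[l:l+k] removed is a subsequence of s via a plain greedy iterator scan.
-- outside the precondition, e.g. on minimumScore('', 'ab'): A raises IndexError, B returns 2
import Mathlib
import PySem

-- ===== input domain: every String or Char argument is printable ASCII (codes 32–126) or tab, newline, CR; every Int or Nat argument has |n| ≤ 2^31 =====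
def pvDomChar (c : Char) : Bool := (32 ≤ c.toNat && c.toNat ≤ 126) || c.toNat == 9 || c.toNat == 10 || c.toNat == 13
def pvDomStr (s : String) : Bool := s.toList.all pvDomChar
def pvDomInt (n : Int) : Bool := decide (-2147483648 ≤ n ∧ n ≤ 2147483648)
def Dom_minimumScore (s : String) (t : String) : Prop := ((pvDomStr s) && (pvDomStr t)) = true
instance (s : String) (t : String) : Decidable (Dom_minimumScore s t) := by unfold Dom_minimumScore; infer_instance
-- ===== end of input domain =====

-- B replaces A's prefix/suffix DP arrays by a different algorithm: binary search on the
-- score k with a direct greedy-subsequence feasibility check (objective: alternative; slower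
-- asymptotically, not claimed faster).

-- ===== PORT A =====
-- A's right-to-left suffix loop (for i in range(n-1,-1,-1): update j; suffix[i] = j)
-- as the obvious structural recursion building the array from the right; the running j
-- is recovered as the head of the already-built tail.
def pvSufA (ct : List Char) (m : Int) : List Char → List Int
  | [] => []
  | c :: rest =>
    let tl := pvSufA ct m rest
    let j := tl.headD 0
    let j' := if j < m ∧ some c = PySem.List.pyGet? ct (m - 1 - j) then j + 1 else j
    j' :: tl

def minimumScore (s : String) (t : String) : Int :=
  let cs := s.toList
  let ct := t.toList
  let n : Int := PySem.Str.len s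
  let m : Int := PySem.Str.len t
  let suffix := pvSufA ct m cs
  -- j = 0; for i in range(n): update j; prefix[i] = j
  let pr := cs.foldl (fun (st : List Int × Int) c =>
      let j' := if st.2 < m ∧ some c = PySem.List.pyGet? ct st.2 then st.2 + 1 else st.2
      (st.1 ++ [j'], j')) (([] : List Int), (0 : Int))
  let pre := pr.1
  -- ans = len(t); for i in range(1, n): ans = min(ans, m - prefix[i-1] - suffix[i])
  let a1 := (PySem.List.pyRange 1 n 1).foldl
      (fun ans i => min ans (m - PySem.List.pyGetD pre (i - 1) 0 - PySem.List.pyGetD suffix i 0)) m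
  let a2 := min a1 (m - PySem.List.pyGetD suffix 0 0)      -- suffix[0]: IndexError on empty s, excluded by Pre_
  let a3 := min a2 (m - PySem.List.pyGetD pre (n - 1) 0)   -- prefix[n-1]: same
  max a3 0

-- ===== PORT B =====
-- the iterator trick `it = iter(s); all(c in it for c in rest)`: greedy subsequence test
def pvIsSub : List Char → List Char → Bool
  | [], _ => true
  | _ :: _, [] => false
  | c :: cs, d :: ds => if c = d then pvIsSub cs ds else pvIsSub (c :: cs) ds

-- can(k): for l in range(m - k + 1): if rest is a subsequence of s: return True
def pvCan (cs ct : List Char) (m k : Int) : Bool :=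
  (PySem.List.pyRange 0 (m - k + 1) 1).any (fun l =>
    pvIsSub (PySem.List.slice ct none (some l) ++ PySem.List.slice ct (some (l + k)) none) cs)

-- while lo < hi: mid = (lo+hi)//2; if can(mid): hi = mid else lo = mid+1  (fuel = loop bound)
def pvBS (cs ct : List Char) (m : Int) : Nat → Int → Int → Int
  | 0, lo, _ => lo
  | fuel + 1, lo, hi =>
    if lo < hi then
      let mid := PySem.Int.floordiv (lo + hi) 2
      if pvCan cs ct m mid then pvBS cs ct m fuel lo mid
      else pvBS cs ct m fuel (mid + 1) hi
    else lo

def minimumScore_alt (s : String) (t : String) : Int :=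
  let cs := s.toList
  let ct := t.toList
  let m : Int := PySem.Str.len t
  pvBS cs ct m (m.toNat + 1) 0 m

-- ===== PRECONDITION & SPEC =====
-- Pre_ excludes only the empty string s, on which A raises IndexError at suffix[0].
def Pre_minimumScore (s : String) (t : String) : Prop := s ≠ ""
instance (s : String) (t : String) : Decidable (Pre_minimumScore s t) := by
  unfold Pre_minimumScore; infer_instance

def pvWitness_minimumScore : String × String := ("aba", "ab")

def Spec_minimumScore (s : String) (t : String) (out : Int) : Prop := out = minimumScore_alt s t
instance (s : String) (t : String) (out : Int) : Decidable (Spec_minimumScore s t out) := by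
  unfold Spec_minimumScore; infer_instance

-- ===== CLAIM (what is proved, stated in full; the proofs are below) =====
def Claim_equal_minimumScore : Prop := ∀ (s : String) (t : String), Dom_minimumScore s t → Pre_minimumScore s t → Spec_minimumScore s t (minimumScore s t)

-- ===== LEMMAS AND PROOFS =====

-- greedy match count of a pattern p scanned over s (the common semantics of both ports'
-- pointer updates: the forward pointer for p = t, the backward pointer for p = t.reverse)
def pvG : List Char → List Char → Nat
  | _, [] => 0
  | [], _ :: _ => 0
  | c :: cs, d :: ds => if c = d then pvG cs ds + 1 else pvG (c :: cs) ds

-- the split-point objective: m - (prefix chars of t matched in s[:i]) - (suffix chars in s[i:])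
def pvF (cs ct : List Char) (i : Nat) : Int :=
  (ct.length : Int) - pvG ct (cs.take i) - pvG ct.reverse ((cs.drop i).reverse)

theorem pvG_nil (s : List Char) : pvG [] s = 0 := by
  cases s <;> rfl

theorem pvG_le (p s : List Char) : pvG p s ≤ p.length := by
  induction s generalizing p with
  | nil => simp [pvG]
  | cons d ds ih =>
    cases p with
    | nil => simp [pvG]
    | cons c cs =>
      by_cases h : c = d
      · simpa [pvG, h] using ih cs
      · simpa [pvG, h] using ih (c :: cs)

-- greedy soundness: the first (pvG p s) chars of p really are a subsequence of s
theorem pvG_sound (p s : List Char) : (p.take (pvG p s)).Sublist s := by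
  induction s generalizing p with
  | nil => simp [pvG]
  | cons d ds ih =>
    cases p with
    | nil => simp [pvG_nil]
    | cons c cs =>
      by_cases h : c = d
      · subst h
        simpa [pvG, List.take_succ_cons] using List.Sublist.cons₂ c (ih cs)
      · simpa [pvG, h] using List.Sublist.cons d (ih (c :: cs))

-- greedy completeness: no k ≤ |p| with p.take k a subsequence of s exceeds the greedy count
theorem pvG_complete (p s : List Char) (k : Nat) (hk : k ≤ p.length)
    (h : (p.take k).Sublist s) : k ≤ pvG p s := by
  induction s generalizing p k with
  | nil =>
    have : (p.take k).length = 0 := by rw [List.sublist_nil.mp h]; rfl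
    simp only [List.length_take] at this
    omega
  | cons d ds ih =>
    cases k with
    | zero => omega
    | succ k' =>
      cases p with
      | nil => simp at hk
      | cons c cs =>
        rw [List.take_succ_cons] at h
        by_cases hcd : c = d
        · subst hcd
          have hsub : (cs.take k').Sublist ds := by
            cases h with
            | cons _ h' => exact (List.sublist_cons_self c (cs.take k')).trans h'
            | cons₂ _ h' => exact h'
          have := ih cs k' (by simpa using hk) hsub
          simp [pvG]
          omega
        · have hsub : (c :: cs.take k').Sublist ds := by
            cases h with
            | cons _ h' => exact h'
            | cons₂ _ h' => exact absurd rfl hcd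
          have := ih (c :: cs) (k' + 1) hk (by rw [List.take_succ_cons]; exact hsub)
          simpa [pvG, hcd] using this

-- greedy extends by one char at the right end of s
theorem pvG_append_singleton (p xs : List Char) (c : Char) :
    pvG p (xs ++ [c]) =
      (if h : pvG p xs < p.length then
         (if p[pvG p xs]'h = c then pvG p xs + 1 else pvG p xs)
       else pvG p xs) := by
  induction xs generalizing p with
  | nil =>
    cases p with
    | nil => simp [pvG, pvG_nil]
    | cons a as =>
      by_cases h : a = c <;> simp [pvG, h]
  | cons x xs' ih =>
    cases p with
    | nil => simp [pvG_nil]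
    | cons a as =>
      by_cases hax : a = x
      · subst hax
        rw [List.cons_append, show pvG (a :: as) (a :: (xs' ++ [c])) = pvG as (xs' ++ [c]) + 1 by
              simp [pvG],
            ih as]
        have hlen : pvG (a :: as) (a :: xs') = pvG as xs' + 1 := by simp [pvG]
        by_cases hl : pvG as xs' < as.length
        · have hl' : pvG (a :: as) (a :: xs') < (a :: as).length := by simp [hlen]; omega
          rw [dif_pos hl, dif_pos hl']
          have : (a :: as)[pvG (a :: as) (a :: xs')]'hl' = as[pvG as xs']'hl := by
            simp [hlen]
          rw [this]
          split <;> simp [hlen]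
        · have hl' : ¬ pvG (a :: as) (a :: xs') < (a :: as).length := by simp [hlen]; omega
          rw [dif_neg hl, dif_neg hl', hlen]
      · rw [List.cons_append, show pvG (a :: as) (x :: (xs' ++ [c])) = pvG (a :: as) (xs' ++ [c]) by
              simp [pvG, hax],
            ih (a :: as),
            show pvG (a :: as) (x :: xs') = pvG (a :: as) xs' by simp [pvG, hax]]

-- pointer advance: scanning one more char c moves the pointer by the greedy one-char step
theorem pvG_cons_ptr (ct : List Char) (j : Nat) (c : Char) (xs : List Char) (hj : j ≤ ct.length) :
    pvG (ct.drop j) (c :: xs) =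
      (if h : j < ct.length then
         (if ct[j]'h = c then pvG (ct.drop (j + 1)) xs + 1 else pvG (ct.drop j) xs)
       else pvG (ct.drop j) xs) := by
  by_cases h : j < ct.length
  · rw [dif_pos h, List.drop_eq_getElem_cons h]
    by_cases hc : ct[j]'h = c
    · simp [pvG, hc]
    · simp [pvG, hc]
  · have hj' : j = ct.length := by omega
    rw [dif_neg h]
    subst hj'
    simp [pvG_nil]

-- A's prefix fold, as the list of running pointers (proof-side mirror of the fold)
def pvPrefA (ct : List Char) (m : Int) (j : Int) : List Char → List Int
  | [] => []
  | c :: cs =>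
    let j' := if j < m ∧ some c = PySem.List.pyGet? ct j then j + 1 else j
    j' :: pvPrefA ct m j' cs

theorem prefix_foldl (ct : List Char) (m : Int) (cs : List Char) (acc : List Int) (j : Int) :
    cs.foldl (fun (st : List Int × Int) c =>
      (st.1 ++ [if st.2 < m ∧ some c = PySem.List.pyGet? ct st.2 then st.2 + 1 else st.2],
       if st.2 < m ∧ some c = PySem.List.pyGet? ct st.2 then st.2 + 1 else st.2)) (acc, j)
    = (acc ++ pvPrefA ct m j cs,
       (pvPrefA ct m j cs).getLastD j) := by
  induction cs generalizing acc j with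
  | nil => simp [pvPrefA]
  | cons c rest ih =>
    simp only [List.foldl_cons, pvPrefA, ih, List.getLastD_cons, List.append_assoc,
      List.singleton_append]

-- A's prefix array holds exactly the greedy counts on the growing prefixes of s
theorem pvPrefA_eq (ct : List Char) (cs : List Char) (j : Nat) (hj : j ≤ ct.length) :
    pvPrefA ct (ct.length : Int) (j : Int) cs
      = (List.range cs.length).map (fun i => ((pvG (ct.drop j) (cs.take (i + 1)) + j : Nat) : Int)) := by
  induction cs generalizing j with
  | nil => simp [pvPrefA]
  | cons c rest ih =>
    -- the arithmetic form of the pointer update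
    set jn : Nat := if h : j < ct.length then (if ct[j]'h = c then j + 1 else j) else j with hjn
    have hjn_le : jn ≤ ct.length := by
      rw [hjn]; split
      · split <;> omega
      · omega
    have hupd : (if (j : Int) < (ct.length : Int) ∧ some c = PySem.List.pyGet? ct (j : Int)
        then (j : Int) + 1 else (j : Int)) = (jn : Int) := by
      rw [hjn]
      by_cases h : j < ct.length
      · rw [dif_pos h, PySem.List.pyGet?_natCast, List.getElem?_eq_getElem h]
        by_cases hc : ct[j]'h = c
        · rw [if_pos ⟨by exact_mod_cast h, by rw [hc]⟩, if_pos hc]; push_cast; ring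
        · rw [if_neg, if_neg hc]
          rintro ⟨-, he⟩
          exact hc (by injection he with he'; exact he'.symm)
      · rw [dif_neg h, if_neg]
        rintro ⟨hlt, -⟩
        exact h (by exact_mod_cast hlt)
    have hstep : ∀ xs : List Char,
        pvG (ct.drop j) (c :: xs) = pvG (ct.drop jn) xs + (jn - j) := by
      intro xs
      rw [pvG_cons_ptr ct j c xs hj, hjn]
      by_cases h : j < ct.length
      · rw [dif_pos h, dif_pos h]
        by_cases hc : ct[j]'h = c
        · rw [if_pos hc, if_pos hc]; omega
        · rw [if_neg hc, if_neg hc]; omega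
      · rw [dif_neg h, dif_neg h]; omega
    have hjle : j ≤ jn := by
      rw [hjn]; split
      · split <;> omega
      · omega
    simp only [pvPrefA, hupd, List.length_cons, List.range_succ_eq_map, List.map_cons,
      List.map_map, ih jn hjn_le]
    refine List.cons_eq_cons.mpr ⟨?_, ?_⟩
    · have h0 : pvG (ct.drop jn) [] = 0 := rfl
      have := hstep []
      simp only [List.take_succ_cons, List.take_zero] at *
      rw [this, h0]
      push_cast
      omega
    · apply List.map_congr_left
      intro i _
      simp only [Function.comp, Nat.succ_eq_add_one]
      rw [List.take_succ_cons, hstep (rest.take (i + 1))]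
      push_cast
      omega

-- A's suffix array holds exactly the greedy counts of t.reverse on the reversed tails of s
theorem pvSufA_eq (ct : List Char) (cs : List Char) :
    pvSufA ct (ct.length : Int) cs
      = (List.range cs.length).map (fun i => ((pvG ct.reverse ((cs.drop i).reverse) : Nat) : Int)) := by
  induction cs with
  | nil => simp [pvSufA]
  | cons c rest ih =>
    set gR : Nat := pvG ct.reverse rest.reverse with hgR
    have hgR_le : gR ≤ ct.length := by
      have := pvG_le ct.reverse rest.reverse
      simpa using this
    have hhead :
        ((List.range rest.length).map
          (fun i => ((pvG ct.reverse ((rest.drop i).reverse) : Nat) : Int))).headD 0 = (gR : Int) := by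
      cases rest with
      | nil => simp [hgR, pvG]
      | cons d ds =>
        rw [List.length_cons, List.range_succ_eq_map, List.map_cons, List.headD_cons]
        simp [hgR]
    have happ := pvG_append_singleton ct.reverse rest.reverse c
    simp only [pvSufA, ih, hhead, List.length_cons, List.range_succ_eq_map, List.map_cons,
      List.map_map]
    refine List.cons_eq_cons.mpr ⟨?_, ?_⟩
    · -- head: the pointer update equals the greedy count on (c :: rest).drop 0 reversed
      rw [List.drop_zero, List.reverse_cons, happ]
      by_cases h : gR < ct.length
      · have hR : gR < ct.reverse.length := by simpa using h
        have hidx : (ct.length : Int) - 1 - (gR : Int) = ((ct.length - 1 - gR : Nat) : Int) := by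
          omega
        have hlt : ct.length - 1 - gR < ct.length := by omega
        have hgetr : ct.reverse[gR]'hR = ct[ct.length - 1 - gR]'hlt := by
          simp [List.getElem_reverse]
        rw [hidx, PySem.List.pyGet?_natCast, List.getElem?_eq_getElem hlt, dif_pos hR]
        by_cases hc : ct.reverse[gR]'hR = c
        · rw [if_pos ⟨by exact_mod_cast h, by rw [← hgetr, hc]⟩, if_pos hc]
          push_cast; ring
        · rw [if_neg, if_neg hc]
          rintro ⟨-, he⟩
          exact hc (by rw [hgetr]; injection he with he'; exact he'.symm)
      · have hR : ¬ gR < ct.reverse.length := by simpa using h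
        rw [dif_neg hR, if_neg]
        rintro ⟨hlt, -⟩
        exact h (by exact_mod_cast hlt)
    · apply List.map_congr_left
      intro i _
      simp [Function.comp]

-- fold-min toolkit
theorem fold_min_le_iff (l : List Int) (a k : Int) :
    l.foldl min a ≤ k ↔ a ≤ k ∨ ∃ x ∈ l, x ≤ k := by
  induction l generalizing a with
  | nil => simp
  | cons x l ih =>
    rw [List.foldl_cons, ih]
    simp only [List.mem_cons, min_le_iff]
    constructor
    · rintro ((h | h) | ⟨y, hy, hk⟩)
      · exact Or.inl h
      · exact Or.inr ⟨x, Or.inl rfl, h⟩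
      · exact Or.inr ⟨y, Or.inr hy, hk⟩
    · rintro (h | ⟨y, (rfl | hy), hk⟩)
      · exact Or.inl (Or.inl h)
      · exact Or.inl (Or.inr hk)
      · exact Or.inr ⟨y, hy, hk⟩

theorem le_fold_min_iff (l : List Int) (a k : Int) :
    k ≤ l.foldl min a ↔ k ≤ a ∧ ∀ x ∈ l, k ≤ x := by
  induction l generalizing a with
  | nil => simp
  | cons x l ih =>
    rw [List.foldl_cons, ih]
    simp only [le_min_iff, List.mem_cons]
    constructor
    · rintro ⟨⟨h1, h2⟩, h3⟩
      exact ⟨h1, fun y hy => hy.elim (fun e => e ▸ h2) (h3 y)⟩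
    · rintro ⟨h1, h2⟩
      exact ⟨⟨h1, h2 x (Or.inl rfl)⟩, fun y hy => h2 y (Or.inr hy)⟩

theorem fold_min_mem (l : List Int) (a : Int) :
    l.foldl min a = a ∨ l.foldl min a ∈ l := by
  induction l generalizing a with
  | nil => exact Or.inl rfl
  | cons x l ih =>
    rw [List.foldl_cons]
    rcases ih (min a x) with h | h
    · rcases min_choice a x with hm | hm
      · exact Or.inl (h.trans hm)
      · refine Or.inr ?_
        rw [h, hm]
        exact List.mem_cons_self
    · exact Or.inr (List.mem_cons_of_mem x h)

-- pvIsSub decides the sublist relation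
theorem pvIsSub_iff (u w : List Char) : pvIsSub u w = true ↔ u.Sublist w := by
  induction w generalizing u with
  | nil =>
    cases u with
    | nil => simp [pvIsSub]
    | cons c cs => simp [pvIsSub]
  | cons d ds ih =>
    cases u with
    | nil => simp [pvIsSub, List.nil_sublist]
    | cons c cs =>
      by_cases h : c = d
      · subst h
        rw [show pvIsSub (c :: cs) (c :: ds) = pvIsSub cs ds by simp [pvIsSub], ih,
          List.cons_sublist_cons]
      · rw [show pvIsSub (c :: cs) (d :: ds) = pvIsSub (c :: cs) ds by simp [pvIsSub, h], ih]
        constructor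
        · exact fun hs => hs.cons d
        · intro hs
          cases hs with
          | cons _ h' => exact h'
          | cons₂ _ h' => exact absurd rfl h

-- characterization of B's feasibility test: for 0 ≤ k ≤ m, can(k) holds iff some split
-- point i of s has objective value F i ≤ k
theorem pvCan_iff (cs ct : List Char) (k : Int) (hk0 : 0 ≤ k) (hkm : k ≤ (ct.length : Int)) :
    pvCan cs ct (ct.length : Int) k = true ↔ ∃ i ≤ cs.length, pvF cs ct i ≤ k := by
  unfold pvCan
  rw [List.any_eq_true]
  constructor
  · rintro ⟨l, hl, hsub⟩
    rw [PySem.List.mem_pyRange_one] at hl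
    obtain ⟨hl0, hlm⟩ := hl
    rw [PySem.List.slice_to ct hl0, PySem.List.slice_from ct (by omega : (0:Int) ≤ l + k),
      pvIsSub_iff, List.append_sublist_iff] at hsub
    obtain ⟨r1, r2, hcs, h1, h2⟩ := hsub
    refine ⟨r1.length, by rw [hcs]; simp, ?_⟩
    have htake : cs.take r1.length = r1 := by rw [hcs, List.take_left]
    have hdrop : cs.drop r1.length = r2 := by rw [hcs, List.drop_left]
    have hpre : l.toNat ≤ pvG ct (cs.take r1.length) := by
      refine pvG_complete ct (cs.take r1.length) l.toNat (by omega) ?_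
      rw [htake]; exact h1
    have hsuf : ct.length - (l + k).toNat ≤ pvG ct.reverse ((cs.drop r1.length).reverse) := by
      refine pvG_complete ct.reverse ((cs.drop r1.length).reverse) (ct.length - (l + k).toNat)
        (by simp) ?_
      rw [hdrop, ← List.reverse_drop]
      exact List.reverse_sublist.mpr h2
    simp only [pvF]
    omega
  · rintro ⟨i, hin, hFi⟩
    have hpre0 : pvG ct (cs.take i) ≤ ct.length := pvG_le _ _
    have hsuf0 : pvG ct.reverse ((cs.drop i).reverse) ≤ ct.length := by
      have := pvG_le ct.reverse ((cs.drop i).reverse)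
      simpa using this
    set pre := pvG ct (cs.take i) with hpredef
    set suf := pvG ct.reverse ((cs.drop i).reverse) with hsufdef
    set lN : Nat := min pre (ct.length - k.toNat) with hlN
    refine ⟨(lN : Int), ?_, ?_⟩
    · rw [PySem.List.mem_pyRange_one]
      constructor
      · omega
      · omega
    · have hik : (lN : Int) + k = ((lN + k.toNat : Nat) : Int) := by omega
      rw [PySem.List.slice_to_natCast, hik, PySem.List.slice_from_natCast, pvIsSub_iff]
      have h1 : (ct.take lN).Sublist (cs.take i) := by
        have he : ct.take lN = (ct.take pre).take lN := by
          rw [List.take_take, min_eq_left (by omega)]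
        rw [he]
        exact (List.take_sublist lN (ct.take pre)).trans (pvG_sound ct (cs.take i))
      have h2 : (ct.drop (lN + k.toNat)).Sublist (cs.drop i) := by
        rw [← List.reverse_sublist, List.reverse_drop]
        have hle : ct.length - (lN + k.toNat) ≤ suf := by
          simp only [pvF] at hFi
          omega
        have he : ct.reverse.take (ct.length - (lN + k.toNat))
            = (ct.reverse.take suf).take (ct.length - (lN + k.toNat)) := by
          rw [List.take_take, min_eq_left hle]
        rw [he]
        exact (List.take_sublist _ _).trans (pvG_sound ct.reverse ((cs.drop i).reverse))
      have := h1.append h2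
      rwa [List.take_append_drop] at this

-- the target value both programs compute
def pvTarget (cs ct : List Char) : Int :=
  max 0 (((List.range (cs.length + 1)).map (pvF cs ct)).foldl min (ct.length : Int))

theorem pvTarget_le_m (cs ct : List Char) : pvTarget cs ct ≤ (ct.length : Int) := by
  have h := (fold_min_le_iff ((List.range (cs.length + 1)).map (pvF cs ct)) (ct.length : Int)
    (ct.length : Int)).mpr (Or.inl le_rfl)
  simp only [pvTarget]
  omega

-- for 0 ≤ x < m, can(x) ↔ target ≤ x
theorem pvCan_char (cs ct : List Char) (x : Int) (h0 : 0 ≤ x) (hm : x < (ct.length : Int)) :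
    pvCan cs ct (ct.length : Int) x = true ↔ pvTarget cs ct ≤ x := by
  rw [pvCan_iff cs ct x h0 (le_of_lt hm)]
  unfold pvTarget
  constructor
  · rintro ⟨i, hi, hF⟩
    refine max_le h0 ?_
    exact (fold_min_le_iff _ _ _).mpr
      (Or.inr ⟨pvF cs ct i, List.mem_map.mpr ⟨i, List.mem_range.mpr (by omega), rfl⟩, hF⟩)
  · intro htar
    have hfold : ((List.range (cs.length + 1)).map (pvF cs ct)).foldl min (ct.length : Int) ≤ x :=
      le_trans (le_max_right _ _) htar
    rcases fold_min_mem ((List.range (cs.length + 1)).map (pvF cs ct)) (ct.length : Int) with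
      he | he
    · rw [he] at hfold; omega
    · obtain ⟨i, hir, hEq⟩ := List.mem_map.mp he
      exact ⟨i, by have := List.mem_range.mp hir; omega, by rw [hEq]; exact hfold⟩

-- binary search returns the unique R with lo ≤ R ≤ hi characterized on [lo, hi)
theorem pvBS_eq (cs ct : List Char) (R : Int)
    (hchar : ∀ x, 0 ≤ x → x < (ct.length : Int) → (pvCan cs ct (ct.length : Int) x = true ↔ R ≤ x)) :
    ∀ (fuel : Nat) (lo hi : Int), 0 ≤ lo → lo ≤ hi → hi ≤ (ct.length : Int) →
      (hi - lo).toNat ≤ fuel → lo ≤ R → R ≤ hi →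
      pvBS cs ct (ct.length : Int) fuel lo hi = R := by
  intro fuel
  induction fuel with
  | zero =>
    intro lo hi h0lo hlohi hhim hfuel hloR hRhi
    simp only [pvBS]
    omega
  | succ fuel ih =>
    intro lo hi h0lo hlohi hhim hfuel hloR hRhi
    simp only [pvBS]
    by_cases hlt : lo < hi
    · rw [if_pos hlt]
      obtain ⟨hm1, hm2⟩ := PySem.Int.floordiv_two_mid_bounds (le_of_lt hlt)
      have hmidlt : PySem.Int.floordiv (lo + hi) 2 < hi := by
        rw [PySem.Int.floordiv_lt_iff_lt_mul (by norm_num)]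
        omega
      by_cases hcan : pvCan cs ct (ct.length : Int) (PySem.Int.floordiv (lo + hi) 2) = true
      · rw [if_pos hcan]
        have hRmid : R ≤ PySem.Int.floordiv (lo + hi) 2 :=
          (hchar _ (by omega) (by omega)).mp hcan
        exact ih lo _ h0lo (by omega) (by omega) (by omega) hloR hRmid
      · rw [if_neg hcan]
        have hmidR : ¬ R ≤ PySem.Int.floordiv (lo + hi) 2 := fun hR =>
          hcan ((hchar _ (by omega) (by omega)).mpr hR)
        exact ih _ hi (by omega) (by omega) hhim (by omega) (by omega) hRhi
    · rw [if_neg hlt]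
      omega

-- B computes the target
theorem alt_eq_target (s t : String) : minimumScore_alt s t = pvTarget s.toList t.toList := by
  unfold minimumScore_alt
  rw [PySem.Str.len_eq]
  exact pvBS_eq s.toList t.toList (pvTarget s.toList t.toList)
    (fun x h0 hm => pvCan_char s.toList t.toList x h0 hm)
    _ 0 _ le_rfl (by omega) le_rfl (by omega)
    (le_max_left 0 _) (pvTarget_le_m s.toList t.toList)

-- fold ≤ element bound, specialization of fold_min_le_iff
theorem fold_min_le_elem (l : List Int) (a x : Int) (hx : x ∈ l) : l.foldl min a ≤ x :=
  (fold_min_le_iff l a x).mpr (Or.inr ⟨x, hx, le_rfl⟩)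

theorem fold_min_le_init (l : List Int) (a : Int) : l.foldl min a ≤ a :=
  (fold_min_le_iff l a a).mpr (Or.inl le_rfl)

-- A's three-stage minimum (interior splits, split 0, split n) equals the single minimum
-- over all splits 0 .. n
theorem assemble (cs ct : List Char) (h1 : 1 ≤ cs.length) :
    min (min (((List.range (cs.length - 1)).map (fun k => pvF cs ct (k + 1))).foldl min
        (ct.length : Int)) (pvF cs ct 0)) (pvF cs ct cs.length)
      = ((List.range (cs.length + 1)).map (pvF cs ct)).foldl min (ct.length : Int) := by
  set A1 := ((List.range (cs.length - 1)).map (fun k => pvF cs ct (k + 1))).foldl min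
    (ct.length : Int) with hA1
  set Rv := ((List.range (cs.length + 1)).map (pvF cs ct)).foldl min (ct.length : Int) with hRv
  apply le_antisymm
  · rw [hRv, le_fold_min_iff]
    refine ⟨le_trans (min_le_left _ _) (le_trans (min_le_left _ _) (fold_min_le_init _ _)), ?_⟩
    intro x hx
    obtain ⟨i, hir, rfl⟩ := List.mem_map.mp hx
    have hilt := List.mem_range.mp hir
    by_cases hi0 : i = 0
    · subst hi0
      exact le_trans (min_le_left _ _) (min_le_right _ _)
    · by_cases hin : i = cs.length
      · subst hin
        exact min_le_right _ _
      · refine le_trans (min_le_left _ _) (le_trans (min_le_left _ _) ?_)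
        refine fold_min_le_elem _ _ _ ?_
        refine List.mem_map.mpr ⟨i - 1, List.mem_range.mpr (by omega), ?_⟩
        congr 1
        omega
  · refine le_min (le_min ?_ ?_) ?_
    · rw [hA1, le_fold_min_iff]
      refine ⟨fold_min_le_init _ _, ?_⟩
      intro x hx
      obtain ⟨k, hkr, rfl⟩ := List.mem_map.mp hx
      have := List.mem_range.mp hkr
      exact fold_min_le_elem _ _ _
        (List.mem_map.mpr ⟨k + 1, List.mem_range.mpr (by omega), rfl⟩)
    · exact fold_min_le_elem _ _ _
        (List.mem_map.mpr ⟨0, List.mem_range.mpr (by omega), rfl⟩)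
    · exact fold_min_le_elem _ _ _
        (List.mem_map.mpr ⟨cs.length, List.mem_range.mpr (by omega), rfl⟩)

-- A computes the target (for nonempty s)
theorem a_eq_target (s t : String) (h : s ≠ "") : minimumScore s t = pvTarget s.toList t.toList := by
  have hcs : s.toList ≠ [] := fun hnil => h (String.toList_eq_nil_iff.mp hnil)
  have hn1 : 1 ≤ s.toList.length := by
    cases hl : s.toList with
    | nil => exact absurd hl hcs
    | cons a l => simp
  simp only [minimumScore]
  -- prefix array (rewrite the fold before exposing Str.len, whose Decidable instances
  -- inside the fold's lambda would block a syntactic rewrite)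
  rw [prefix_foldl, List.nil_append]
  simp only [PySem.Str.len_eq]
  have hpreL := pvPrefA_eq t.toList s.toList 0 (Nat.zero_le _)
  simp only [Nat.cast_zero, List.drop_zero, Nat.add_zero] at hpreL
  rw [hpreL, pvSufA_eq]
  -- the interior fold over range(1, n)
  rw [PySem.List.pyRange_one 1 ((s.toList.length : Nat) : Int), List.foldl_map]
  have htn : (((s.toList.length : Nat) : Int) - 1).toNat = s.toList.length - 1 := by omega
  rw [htn]
  rw [PySem.List.foldl_congr_mem (List.range (s.toList.length - 1)) _
      (fun ans k => min ans (pvF s.toList t.toList (k + 1))) ((t.toList.length : Nat) : Int) ?hcg]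
  case hcg =>
    intro acc k hk
    have hklt := List.mem_range.mp hk
    have e1 : (1 : Int) + (k : Int) - 1 = ((k : Nat) : Int) := by omega
    have e2 : (1 : Int) + (k : Int) = (((k + 1 : Nat)) : Int) := by push_cast; ring
    rw [e1, e2, PySem.List.pyGetD_natCast, PySem.List.pyGetD_natCast,
      PySem.List.getD_map_range _ _ _ _ (by omega), PySem.List.getD_map_range _ _ _ _ (by omega)]
    rfl
  rw [← List.foldl_map]
  -- the two boundary terms
  rw [PySem.List.pyGetD_zero, PySem.List.getD_map_range _ _ _ _ (by omega), List.drop_zero]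
  have e3 : ((s.toList.length : Nat) : Int) - 1 = ((s.toList.length - 1 : Nat) : Int) := by omega
  rw [e3, PySem.List.pyGetD_natCast, PySem.List.getD_map_range _ _ _ _ (by omega)]
  have e4 : s.toList.length - 1 + 1 = s.toList.length := by omega
  rw [e4, List.take_length]
  -- fold the three stages into the single minimum over all splits
  have hT0 : ((t.toList.length : Nat) : Int) - ((pvG t.toList.reverse s.toList.reverse : Nat) : Int)
      = pvF s.toList t.toList 0 := by
    simp [pvF, pvG]
  have hTn : ((t.toList.length : Nat) : Int) - ((pvG t.toList s.toList : Nat) : Int)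
      = pvF s.toList t.toList s.toList.length := by
    simp only [pvF, List.take_length, List.drop_length, List.reverse_nil]
    simp [pvG]
  rw [hT0, hTn, assemble s.toList t.toList hn1]
  simp only [pvTarget]
  exact max_comm _ _

-- ===== VERDICT (by name: the statement is the Claim_ definition above) =====
theorem minimumScore_spec : Claim_equal_minimumScore := by
  intro s t _ hpre
  unfold Spec_minimumScore
  rw [a_eq_target s t hpre, alt_eq_target]
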